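-- pv_equiv track=rewrite | github.com/AdylshaY/Coderbyte | EvenPairs.py | EvenPairs
-- ===== SOURCE A (Python) =====
-- def EvenPairs(strParam):
--   count = 0
--   for char in strParam:
--     if char.isdigit():
--       if int(char) % 2 == 0:
--         count += 1
--         if count == 2:
--           return 'true'
--       else:
--         continue
--     else:
--       count = 0
--   return 'false'
-- ===== SOURCE B (Python) =====
-- def _hasTwoEvens(run):
--   count = 0
--   for c in run:
--     if int(c) % 2 == 0:
--       count += 1
--       if count == 2:
--         return True
--   return False
--
-- def EvenPairs(strParam):
--   # segment the string into maximal runs of equal isdigit-ness, scan digit runs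
--   i, n = 0, len(strParam)
--   while i < n:
--     k = strParam[i].isdigit()
--     j = i
--     while j < n and strParam[j].isdigit() == k:
--       j += 1
--     if k and _hasTwoEvens(strParam[i:j]):
--       return 'true'
--     i = j
--   return 'false'
-- ===== Notes on version B (the rewrite author's own statement) =====
-- stated objective: alternative
-- what changed: A makes a single pass with a counter that odd digits leave alone and non-digits reset; B first segments the string into maximal digit/non-digit runs with an explicit index loop and then checks each digit run for two even digits with a separate helper.
import Mathlib
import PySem

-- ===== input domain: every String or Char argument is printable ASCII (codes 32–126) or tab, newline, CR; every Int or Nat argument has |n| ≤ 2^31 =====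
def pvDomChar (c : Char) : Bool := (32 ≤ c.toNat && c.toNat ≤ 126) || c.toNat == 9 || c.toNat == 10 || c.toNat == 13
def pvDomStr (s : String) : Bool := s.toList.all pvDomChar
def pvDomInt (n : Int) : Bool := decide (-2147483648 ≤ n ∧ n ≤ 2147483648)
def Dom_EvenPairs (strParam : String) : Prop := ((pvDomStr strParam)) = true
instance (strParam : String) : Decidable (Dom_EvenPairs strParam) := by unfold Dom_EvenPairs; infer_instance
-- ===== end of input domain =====

-- B segments the string into maximal digit/non-digit runs and scans digit runs; same cost,
-- chosen as a genuinely different decomposition of A's single pass with a reset counter.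

-- ===== PORT A =====
-- char.isdigit → Char.isDigit and int(char) → toNat-48: exact on the ASCII domain Dom_EvenPairs.
def pvGoA : List Char → Nat → String
  | [], _ => "false"
  | c :: rest, count =>
    if c.isDigit then
      if (c.toNat - 48) % 2 == 0 then
        if count + 1 == 2 then "true" else pvGoA rest (count + 1)
      else pvGoA rest count
    else pvGoA rest 0

def EvenPairs (strParam : String) : String := pvGoA strParam.toList 0

-- ===== PORT B =====
-- takeRun k l = longest prefix of l whose chars have isDigit = k, paired with the rest
def pvTakeRun (k : Bool) : List Char → List Char × List Char
  | [] => ([], [])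
  | c :: rest =>
    if c.isDigit = k then
      let p := pvTakeRun k rest
      (c :: p.1, p.2)
    else ([], c :: rest)

theorem pvTakeRun_snd_len (k : Bool) (l : List Char) : (pvTakeRun k l).2.length ≤ l.length := by
  induction l with
  | nil => simp [pvTakeRun]
  | cons c rest ih =>
    simp only [pvTakeRun]
    split
    · exact le_trans ih (Nat.le_succ _)
    · simp

def pvHasTwoEvens : List Char → Nat → Bool
  | [], _ => false
  | c :: rest, count =>
    if (c.toNat - 48) % 2 == 0 then
      if count + 1 == 2 then true else pvHasTwoEvens rest (count + 1)
    else pvHasTwoEvens rest count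

def pvScan : List Char → String
  | [] => "false"
  | c :: rest =>
    let p := pvTakeRun c.isDigit rest
    if c.isDigit && pvHasTwoEvens (c :: p.1) 0 then "true" else pvScan p.2
termination_by l => l.length
decreasing_by
  exact Nat.lt_succ_of_le (pvTakeRun_snd_len _ _)

def EvenPairs_alt (strParam : String) : String := pvScan strParam.toList

-- ===== PRECONDITION & SPEC =====
def Spec_EvenPairs (strParam : String) (out : String) : Prop := out = EvenPairs_alt strParam
instance (strParam : String) (out : String) : Decidable (Spec_EvenPairs strParam out) := by unfold Spec_EvenPairs; infer_instance

-- ===== CLAIM (what is proved, stated in full; the proofs are below) =====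
def Claim_equal_EvenPairs : Prop := ∀ (strParam : String), Dom_EvenPairs strParam → Spec_EvenPairs strParam (EvenPairs strParam)

-- ===== LEMMAS AND PROOFS =====

theorem pvTakeRun_eq (k : Bool) (l : List Char) :
    (pvTakeRun k l).1 ++ (pvTakeRun k l).2 = l := by
  induction l with
  | nil => simp [pvTakeRun]
  | cons c rest ih =>
    simp only [pvTakeRun]
    split
    · simpa using ih
    · simp

theorem pvTakeRun_fst_all (k : Bool) (l : List Char) :
    ∀ c ∈ (pvTakeRun k l).1, c.isDigit = k := by
  induction l with
  | nil => simp [pvTakeRun]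
  | cons c rest ih =>
    simp only [pvTakeRun]
    split
    · rename_i h
      intro x hx
      simp only [List.mem_cons] at hx
      rcases hx with rfl | hx
      · exact h
      · exact ih x hx
    · simp

theorem pvTakeRun_snd_head (k : Bool) (l : List Char) :
    ∀ h t, (pvTakeRun k l).2 = h :: t → h.isDigit ≠ k := by
  induction l with
  | nil => simp [pvTakeRun]
  | cons c rest ih =>
    simp only [pvTakeRun]
    split
    · exact ih
    · rename_i hne
      intro h t he
      cases he
      simpa using hne

-- count does not matter when the list is empty or starts with a non-digit
theorem pvGoA_boundary (t : List Char) (ht : ∀ h t', t = h :: t' → h.isDigit = false)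
    (count : Nat) : pvGoA t count = pvGoA t 0 := by
  cases t with
  | nil => rfl
  | cons h t' =>
    have := ht h t' rfl
    simp [pvGoA, this]

-- over an all-digit run followed by a boundary, A is B's inner counter
theorem pvGoA_digit_run (run : List Char) :
    ∀ t count, (∀ c ∈ run, c.isDigit = true) →
      (∀ h t', t = h :: t' → h.isDigit = false) →
      pvGoA (run ++ t) count =
        if pvHasTwoEvens run count then "true" else pvGoA t 0 := by
  induction run with
  | nil =>
    intro t count _ ht
    simp [pvHasTwoEvens, pvGoA_boundary t ht count]
  | cons c rest ih =>
    intro t count hall ht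
    have hc : c.isDigit = true := hall c (List.mem_cons_self ..)
    have hrest : ∀ x ∈ rest, x.isDigit = true := fun x hx => hall x (List.mem_cons_of_mem _ hx)
    simp only [List.cons_append, pvGoA, hc, if_true, pvHasTwoEvens]
    by_cases hp : ((c.toNat - 48) % 2 == 0) = true
    · simp only [hp, if_true]
      by_cases h2 : (count + 1 == 2) = true
      · simp [h2]
      · simp only [h2, if_false, Bool.false_eq_true]
        exact ih t (count + 1) hrest ht
    · simp only [Bool.not_eq_true] at hp
      simp only [hp, Bool.false_eq_true, if_false]
      exact ih t count hrest ht

-- an all-non-digit run is skipped by A when its counter is 0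
theorem pvGoA_skip_run (run : List Char) :
    ∀ t, (∀ c ∈ run, c.isDigit = false) → pvGoA (run ++ t) 0 = pvGoA t 0 := by
  induction run with
  | nil => intro t _; rfl
  | cons c rest ih =>
    intro t hall
    have hc : c.isDigit = false := hall c (List.mem_cons_self ..)
    simp only [List.cons_append, pvGoA, hc, Bool.false_eq_true, if_false]
    exact ih t (fun x hx => hall x (List.mem_cons_of_mem _ hx))

theorem pvGoA_eq_pvScan_aux : ∀ (n : Nat) (l : List Char), l.length ≤ n → pvGoA l 0 = pvScan l := by
  intro n
  induction n with
  | zero =>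
    intro l hl
    have : l = [] := List.eq_nil_of_length_eq_zero (Nat.le_zero.mp hl)
    subst this
    rw [pvScan]
    rfl
  | succ n ih =>
    intro l hl
    cases l with
    | nil => rw [pvScan]; rfl
    | cons c rest =>
      rw [pvScan]
      have hsplit : (pvTakeRun c.isDigit rest).1 ++ (pvTakeRun c.isDigit rest).2 = rest :=
        pvTakeRun_eq _ _
      have hall : ∀ x ∈ (pvTakeRun c.isDigit rest).1, x.isDigit = c.isDigit :=
        pvTakeRun_fst_all _ _
      have hhead : ∀ h t', (pvTakeRun c.isDigit rest).2 = h :: t' → h.isDigit ≠ c.isDigit :=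
        pvTakeRun_snd_head _ _
      have hlen : (pvTakeRun c.isDigit rest).2.length ≤ n := by
        have := pvTakeRun_snd_len c.isDigit rest
        simp only [List.length_cons] at hl
        omega
      have ihp := ih _ hlen
      by_cases hk : c.isDigit = true
      · have hhead' : ∀ h t', (pvTakeRun c.isDigit rest).2 = h :: t' → h.isDigit = false := by
          intro h t' he
          have := hhead h t' he
          rw [hk] at this
          simpa using this
        have hrun : pvGoA (c :: rest) 0 =
            if pvHasTwoEvens (c :: (pvTakeRun c.isDigit rest).1) 0 then "true"
            else pvGoA (pvTakeRun c.isDigit rest).2 0 := by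
          have := pvGoA_digit_run (c :: (pvTakeRun c.isDigit rest).1)
            (pvTakeRun c.isDigit rest).2 0
            (by intro x hx
                rcases List.mem_cons.mp hx with rfl | hx
                · exact hk
                · rw [hall x hx]; exact hk)
            hhead'
          rw [← this]
          simp [hsplit]
        rw [hrun, ihp, hk]
        simp
      · have hk' : c.isDigit = false := by simpa using hk
        have hrun : pvGoA (c :: rest) 0 = pvGoA (pvTakeRun c.isDigit rest).2 0 := by
          have := pvGoA_skip_run (c :: (pvTakeRun c.isDigit rest).1)
            (pvTakeRun c.isDigit rest).2
            (by intro x hx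
                rcases List.mem_cons.mp hx with rfl | hx
                · exact hk'
                · rw [hall x hx]; exact hk')
          rw [← this]
          simp [hsplit]
        rw [hrun, ihp, hk']
        simp

theorem pvGoA_eq_pvScan (l : List Char) : pvGoA l 0 = pvScan l :=
  pvGoA_eq_pvScan_aux l.length l (Nat.le_refl _)

-- ===== VERDICT (by name: the statement is the Claim_ definition above) =====
theorem EvenPairs_spec : Claim_equal_EvenPairs := by
  intro s _
  unfold Spec_EvenPairs EvenPairs EvenPairs_alt
  exact pvGoA_eq_pvScan s.toList
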